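-- pv_equiv track=rewrite | github.com/StonHamA/PRIMA | chunk-pdf-files.py | merge_and_split_paragraphs
-- ===== SOURCE A (Python) =====
-- def split_paragraph_by_wordcount(text, max_words=400):
--     words = text.split()
--     splits = []
--     for i in range(0, len(words), max_words):
--         chunk = " ".join(words[i:i+max_words])
--         splits.append(chunk)
--     return splits
--
-- def merge_and_split_paragraphs(paragraphs, min_len=100, max_len=400):
--     merged = []
--     buffer = ""
--
--     for para in paragraphs:
--         if not buffer:
--             buffer = para
--         else:
--             buffer += " " + para
--
--         word_count = len(buffer.split())
--         if word_count >= min_len: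
--             if word_count > max_len:
--                 splits = split_paragraph_by_wordcount(buffer, max_len)
--                 merged.extend(splits)
--                 buffer = ""
--             else:
--                 merged.append(buffer.strip())
--                 buffer = ""
--
--     if buffer:
--         merged.append(buffer.strip())
--
--     return merged
-- ===== SOURCE B (Python) =====
-- def split_paragraph_by_wordcount(text, max_words=400):
--     words = text.split()
--     splits = []
--     for i in range(0, len(words), max_words):
--         chunk = " ".join(words[i:i+max_words])
--         splits.append(chunk)
--     return splits
--
-- def _join_block(parts):
--     buf = ""
--     for p in parts:
--         buf = p if not buf else buf + " " + p
--     return buf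
--
-- def merge_and_split_paragraphs(paragraphs, min_len=100, max_len=400):
--     # Pass 1: group paragraphs into blocks using a RUNNING word count
--     # (never re-splitting the growing buffer, unlike A).
--     pieces = []   # (joined block, its word count)
--     block = []
--     count = 0
--     for para in paragraphs:
--         block.append(para)
--         count += len(para.split())
--         if count >= min_len:
--             pieces.append((_join_block(block), count))
--             block = []
--             count = 0
--     # Pass 2: split oversized pieces, strip the rest.
--     out = []
--     for seg, wc in pieces:
--         if wc > max_len:
--             out.extend(split_paragraph_by_wordcount(seg, max_len))
--         else:
--             out.append(seg.strip())
--     tail = _join_block(block)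
--     if tail:
--         out.append(tail.strip())
--     return out
-- ===== Notes on version B (the rewrite author's own statement) =====
-- stated objective: faster
-- what changed: A re-splits the whole growing buffer at every paragraph inside one interleaved loop; B keeps a running word count plus the block's paragraph list in a grouping pass, joins a block only when it flushes, and a separate second pass splits or strips each flushed block.
import Mathlib
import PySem

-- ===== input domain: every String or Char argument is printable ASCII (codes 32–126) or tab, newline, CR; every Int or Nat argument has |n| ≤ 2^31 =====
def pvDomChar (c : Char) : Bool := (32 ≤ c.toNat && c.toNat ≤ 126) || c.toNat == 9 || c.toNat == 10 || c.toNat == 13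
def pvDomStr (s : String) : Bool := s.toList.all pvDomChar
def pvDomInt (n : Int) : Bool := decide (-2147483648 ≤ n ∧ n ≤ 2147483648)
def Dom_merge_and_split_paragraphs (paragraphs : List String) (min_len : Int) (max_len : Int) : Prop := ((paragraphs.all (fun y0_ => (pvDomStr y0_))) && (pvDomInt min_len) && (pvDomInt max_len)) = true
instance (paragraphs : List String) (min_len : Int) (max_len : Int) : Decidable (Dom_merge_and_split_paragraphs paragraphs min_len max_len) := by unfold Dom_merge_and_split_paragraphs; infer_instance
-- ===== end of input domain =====

-- B replaces A's single loop (which re-splits the whole growing buffer at every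
-- paragraph, quadratic per merged block) by a grouping pass carrying a RUNNING word
-- count and the block's paragraph list, then a second pass that splits/strips each
-- flushed block; equivalence is about the return value (no argument is mutated).

-- ===== PORT A =====
-- module helper split_paragraph_by_wordcount (present verbatim in both Source A and Source B)
def splitParagraphByWordcount (text : String) (max_words : Int) : List String :=
  let words := PySem.Str.split₀ text
  (PySem.List.pyRange 0 (words.length : Int) max_words).foldl
    (fun splits i => splits ++ [PySem.Str.join " " (PySem.List.slice words (some i) (some (i + max_words)))]) []

-- the body of A's for-loop: state = (merged, buffer)
def mergeStepA (min_len max_len : Int) (st : List String × String) (para : String) : List String × String :=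
  let buffer := if st.2 = "" then para else st.2 ++ " " ++ para
  let word_count : Int := ((PySem.Str.split₀ buffer).length : Int)
  if word_count ≥ min_len then
    if word_count > max_len then (st.1 ++ splitParagraphByWordcount buffer max_len, "")
    else (st.1 ++ [PySem.Str.strip buffer], "")
  else (st.1, buffer)

def merge_and_split_paragraphs (paragraphs : List String) (min_len : Int) (max_len : Int) : List String :=
  let st := paragraphs.foldl (mergeStepA min_len max_len) ([], "")
  if st.2 ≠ "" then st.1 ++ [PySem.Str.strip st.2] else st.1

-- ===== PORT B =====
-- Source B's _join_block: fold the block's paragraphs into one buffer string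
def joinBlock (parts : List String) : String :=
  parts.foldl (fun buf p => if buf = "" then p else buf ++ " " ++ p) ""

-- pass 1 body: state = (pieces, block, count); count is a running word count
def groupStep (min_len : Int) (st : List (String × Int) × List String × Int) (para : String) :
    List (String × Int) × List String × Int :=
  let block := st.2.1 ++ [para]
  let count := st.2.2 + ((PySem.Str.split₀ para).length : Int)
  if count ≥ min_len then (st.1 ++ [(joinBlock block, count)], [], 0)
  else (st.1, block, count)

-- pass 2 body: split an oversized piece, strip the rest
def emitStep (max_len : Int) (out : List String) (pc : String × Int) : List String :=
  if pc.2 > max_len then out ++ splitParagraphByWordcount pc.1 max_len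
  else out ++ [PySem.Str.strip pc.1]

def merge_and_split_paragraphs_alt (paragraphs : List String) (min_len : Int) (max_len : Int) : List String :=
  let st := paragraphs.foldl (groupStep min_len) ([], [], 0)
  let out := st.1.foldl (emitStep max_len) []
  let tail := joinBlock st.2.1
  if tail ≠ "" then out ++ [PySem.Str.strip tail] else out

-- ===== PRECONDITION & SPEC =====
-- Pre_ excludes exactly the inputs where Python A raises ValueError (range() with
-- step 0): max_len = 0 together with the word counts forcing some flush of a
-- non-empty buffer into the split branch. A returns normally everywhere else.
def Pre_merge_and_split_paragraphs (paragraphs : List String) (min_len : Int) (max_len : Int) : Prop :=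
  ¬ (max_len = 0 ∧
      ((min_len ≤ 0 ∧ ∃ p ∈ paragraphs, (PySem.Str.split₀ p).length ≠ 0) ∨
       (1 ≤ min_len ∧ min_len ≤ (paragraphs.map (fun p => ((PySem.Str.split₀ p).length : Int))).sum)))
instance (paragraphs : List String) (min_len : Int) (max_len : Int) : Decidable (Pre_merge_and_split_paragraphs paragraphs min_len max_len) := by unfold Pre_merge_and_split_paragraphs; infer_instance

def pvWitness_merge_and_split_paragraphs : List String × Int × Int := (["one two", "three"], 2, 2)

def Spec_merge_and_split_paragraphs (paragraphs : List String) (min_len : Int) (max_len : Int) (out : List String) : Prop := out = merge_and_split_paragraphs_alt paragraphs min_len max_len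
instance (paragraphs : List String) (min_len : Int) (max_len : Int) (out : List String) : Decidable (Spec_merge_and_split_paragraphs paragraphs min_len max_len out) := by unfold Spec_merge_and_split_paragraphs; infer_instance

-- ===== CLAIM (what is proved, stated in full; the proofs are below) =====
def Claim_equal_merge_and_split_paragraphs : Prop := ∀ (paragraphs : List String) (min_len : Int) (max_len : Int), Dom_merge_and_split_paragraphs paragraphs min_len max_len → Pre_merge_and_split_paragraphs paragraphs min_len max_len → Spec_merge_and_split_paragraphs paragraphs min_len max_len (merge_and_split_paragraphs paragraphs min_len max_len)

-- ===== LEMMAS AND PROOFS =====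

-- split₀.go is accumulator-linear
lemma split0_go_acc : ∀ (s cur : List Char) (acc : List (List Char)),
    PySem.Chars.split₀.go s cur acc = acc.reverse ++ PySem.Chars.split₀.go s cur [] := by
  intro s
  induction s with
  | nil => intro cur acc; simp [PySem.Chars.split₀.go]; split <;> simp
  | cons c rest ih =>
    intro cur acc
    simp only [PySem.Chars.split₀.go]
    split
    · split
      · exact ih [] acc
      · rw [ih [] (cur.reverse :: acc), ih [] [cur.reverse]]; simp
    · exact ih (c :: cur) acc

-- splitting at an inserted space concatenates the word lists
lemma split0_go_space : ∀ (a b cur : List Char),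
    PySem.Chars.split₀.go (a ++ ' ' :: b) cur [] =
      PySem.Chars.split₀.go a cur [] ++ PySem.Chars.split₀.go b [] [] := by
  intro a
  induction a with
  | nil =>
    intro b cur
    simp only [List.nil_append]
    by_cases h : cur.isEmpty
    · simp [PySem.Chars.split₀.go, h, show PySem.Chars.isspace ' ' = true from rfl]
    · rw [show PySem.Chars.split₀.go (' ' :: b) cur [] = PySem.Chars.split₀.go b [] [cur.reverse] from by
          have hsp : PySem.Chars.isspace ' ' = true := rfl
          simp [PySem.Chars.split₀.go, hsp, h], split0_go_acc b [] [cur.reverse]]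
      simp [PySem.Chars.split₀.go, h]
  | cons c rest ih =>
    intro b cur
    simp only [List.cons_append, PySem.Chars.split₀.go]
    by_cases hs : PySem.Chars.isspace c
    · by_cases h : cur.isEmpty
      · simp only [hs, h, if_true]
        exact ih b []
      · simp only [hs, h, if_true, Bool.false_eq_true, if_false]
        rw [split0_go_acc (rest ++ ' ' :: b) [] [cur.reverse], ih b [],
            split0_go_acc rest [] [cur.reverse]]
        simp
    · simp only [hs, Bool.false_eq_true, if_false]
      exact ih b (c :: cur)

lemma chars_split0_append (a b : List Char) :
    PySem.Chars.split₀ (a ++ ' ' :: b) = PySem.Chars.split₀ a ++ PySem.Chars.split₀ b := by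
  simp only [PySem.Chars.split₀]; exact split0_go_space a b []

-- word count of "b ++ ' ' ++ p" is additive
lemma wc_append (b p : String) :
    ((PySem.Str.split₀ (b ++ " " ++ p)).length : Int)
      = ((PySem.Str.split₀ b).length : Int) + ((PySem.Str.split₀ p).length : Int) := by
  calc ((PySem.Str.split₀ (b ++ " " ++ p)).length : Int)
      = ((PySem.Chars.split₀ ((b ++ " " ++ p).toList)).length : Int) := by
        simp [PySem.Str.split₀]
    _ = ((PySem.Chars.split₀ (b.toList ++ ' ' :: p.toList)).length : Int) := by
        simp [String.toList_append]
    _ = _ := by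
        rw [chars_split0_append]
        simp [PySem.Str.split₀]

lemma joinBlock_snoc (block : List String) (p : String) :
    joinBlock (block ++ [p]) =
      if joinBlock block = "" then p else joinBlock block ++ " " ++ p := by
  simp [joinBlock, List.foldl_append]

-- word count of the joined block: the empty case needed for the invariant base
lemma wc_empty : ((PySem.Str.split₀ "").length : Int) = 0 := by decide

-- main invariant: A's fold over the remaining paragraphs, started from the processed
-- output and the joined current block, equals B's grouping fold post-processed by the
-- emit fold; the running count stays the buffer's word count.
lemma main_invariant (min_len max_len : Int) :
    ∀ (ps : List String) (pieces : List (String × Int)) (block : List String) (c : Int),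
      c = ((PySem.Str.split₀ (joinBlock block)).length : Int) →
      (ps.foldl (mergeStepA min_len max_len) (pieces.foldl (emitStep max_len) [], joinBlock block)
        = (((ps.foldl (groupStep min_len) (pieces, block, c)).1).foldl (emitStep max_len) [],
           joinBlock (ps.foldl (groupStep min_len) (pieces, block, c)).2.1))
      ∧ (ps.foldl (groupStep min_len) (pieces, block, c)).2.2
          = ((PySem.Str.split₀ (joinBlock (ps.foldl (groupStep min_len) (pieces, block, c)).2.1)).length : Int) := by
  intro ps
  induction ps with
  | nil => intro pieces block c h; exact ⟨rfl, h⟩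
  | cons p ps ih =>
    intro pieces block c h
    have hbuf : (if joinBlock block = "" then p else joinBlock block ++ " " ++ p)
        = joinBlock (block ++ [p]) := (joinBlock_snoc block p).symm
    have hwc : ((PySem.Str.split₀ (joinBlock (block ++ [p]))).length : Int)
        = c + ((PySem.Str.split₀ p).length : Int) := by
      rw [joinBlock_snoc block p]
      by_cases hb : joinBlock block = ""
      · simp only [hb, if_true]
        rw [h, hb, wc_empty]
        ring
      · simp only [hb, if_false]
        rw [wc_append, h]
    have hstep : mergeStepA min_len max_len (pieces.foldl (emitStep max_len) [], joinBlock block) p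
        = ((groupStep min_len (pieces, block, c) p).1.foldl (emitStep max_len) [],
           joinBlock (groupStep min_len (pieces, block, c) p).2.1) := by
      unfold mergeStepA groupStep
      simp only [hbuf, hwc]
      by_cases hge : c + ((PySem.Str.split₀ p).length : Int) ≥ min_len
      · simp only [hge, if_pos]
        rw [List.foldl_append]
        simp only [List.foldl_cons, List.foldl_nil, emitStep]
        split_ifs <;> simp [joinBlock]
      · simp [hge]
    have hinv : (groupStep min_len (pieces, block, c) p).2.2
        = ((PySem.Str.split₀ (joinBlock (groupStep min_len (pieces, block, c) p).2.1)).length : Int) := by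
      unfold groupStep
      by_cases hge : c + ((PySem.Str.split₀ p).length : Int) ≥ min_len
      · simp only [hge, if_pos]
        rw [show joinBlock [] = "" from rfl, wc_empty]
      · simp only [hge, if_false]
        simp [hwc]
    rcases hq : groupStep min_len (pieces, block, c) p with ⟨pieces', block', c'⟩
    simp only [List.foldl_cons, hstep, hq]
    exact ih pieces' block' c' (by simpa [hq] using hinv)

theorem merge_and_split_paragraphs_eq (paragraphs : List String) (min_len max_len : Int) :
    merge_and_split_paragraphs paragraphs min_len max_len
    = merge_and_split_paragraphs_alt paragraphs min_len max_len := by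
  unfold merge_and_split_paragraphs merge_and_split_paragraphs_alt
  have h := (main_invariant min_len max_len paragraphs [] [] 0 (by rw [show joinBlock [] = "" from rfl, wc_empty])).1
  simp only [List.foldl_nil, show joinBlock [] = "" from rfl] at h
  rw [h]

-- ===== VERDICT (by name: the statement is the Claim_ definition above) =====
theorem merge_and_split_paragraphs_spec : Claim_equal_merge_and_split_paragraphs := by
  intro paragraphs min_len max_len _ _
  unfold Spec_merge_and_split_paragraphs
  exact merge_and_split_paragraphs_eq paragraphs min_len max_len
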